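-- pv_equiv track=rewrite | github.com/Champ-Deep/Graphiti-knowledge-graph | services/intent_scorer.py | identify_buying_stage
-- ===== SOURCE A (Python) =====
-- from typing import Dict, List, Optional, Any
--
-- def identify_buying_stage(intent_data: Dict[str, Any]) -> str:
--     """
--     Identify buying stage based on intent signals.
--
--     Returns:
--         'awareness', 'consideration', 'decision', or 'unknown'
--     """
--     signals = intent_data.get('signals_detected', [])
--
--     # Decision stage signals
--     decision_signals = ['demo_request', 'pricing_page_visit', 'email_reply']
--     if any(s in signals for s in decision_signals):
--         return 'decision'
--
--     # Consideration stage signals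
--     consideration_signals = [
--         'case_study_view', 'product_page_visit', 'whitepaper_download',
--         'webinar_attendance', 'return_visitor'
--     ]
--     if any(s in signals for s in consideration_signals):
--         return 'consideration'
--
--     # Awareness stage signals
--     awareness_signals = [
--         'email_open', 'social_share', 'video_watch', 'linkedin_engagement'
--     ]
--     if any(s in signals for s in awareness_signals):
--         return 'awareness'
--
--     return 'unknown'
-- ===== SOURCE B (Python) =====
-- _RANK = {
--     'demo_request': 0, 'pricing_page_visit': 0, 'email_reply': 0,
--     'case_study_view': 1, 'product_page_visit': 1, 'whitepaper_download': 1,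
--     'webinar_attendance': 1, 'return_visitor': 1,
--     'email_open': 2, 'social_share': 2, 'video_watch': 2, 'linkedin_engagement': 2,
-- }
--
-- def identify_buying_stage(intent_data):
--     best = 3
--     for s in intent_data.get('signals_detected', []):
--         r = _RANK.get(s, 3)
--         if r < best:
--             best = r
--     if best == 0:
--         return 'decision'
--     if best == 1:
--         return 'consideration'
--     if best == 2:
--         return 'awareness'
--     return 'unknown'
-- ===== Notes on version B (the rewrite author's own statement) =====
-- stated objective: alternative
-- what changed: Replaces three sequential any-scans over fixed stage lists with a single pass over the input signals that looks each signal up in one prebuilt signal-to-rank table and keeps the minimum rank, translated back to a stage name at the end.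
import Mathlib
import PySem

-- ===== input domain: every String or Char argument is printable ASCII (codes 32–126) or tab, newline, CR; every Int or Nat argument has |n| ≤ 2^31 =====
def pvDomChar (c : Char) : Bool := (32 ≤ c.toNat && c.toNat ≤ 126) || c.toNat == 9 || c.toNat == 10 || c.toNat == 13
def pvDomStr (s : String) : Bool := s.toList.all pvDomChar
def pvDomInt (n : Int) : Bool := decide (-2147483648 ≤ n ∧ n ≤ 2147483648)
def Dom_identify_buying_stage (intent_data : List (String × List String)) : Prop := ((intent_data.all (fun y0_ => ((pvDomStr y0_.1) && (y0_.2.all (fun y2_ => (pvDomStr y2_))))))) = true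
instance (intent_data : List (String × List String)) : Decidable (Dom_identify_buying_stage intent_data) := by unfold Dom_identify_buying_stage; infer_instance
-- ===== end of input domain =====

-- B replaces A's three sequential any-scans over fixed stage lists with one pass over the
-- input signals keeping the minimum rank from a prebuilt signal→rank table (alternative decomposition).

-- ===== PORT A =====
def identify_buying_stage (intent_data : List (String × List String)) : String :=
  let signals := (PySem.Dict.mk intent_data).getD "signals_detected" []
  let decision_signals := ["demo_request", "pricing_page_visit", "email_reply"]
  if decision_signals.any (fun s => signals.contains s) then "decision"
  else
    let consideration_signals := ["case_study_view", "product_page_visit",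
      "whitepaper_download", "webinar_attendance", "return_visitor"]
    if consideration_signals.any (fun s => signals.contains s) then "consideration"
    else
      let awareness_signals := ["email_open", "social_share", "video_watch", "linkedin_engagement"]
      if awareness_signals.any (fun s => signals.contains s) then "awareness"
      else "unknown"

-- ===== PORT B =====
def pvRankTable : PySem.Dict String Int := PySem.Dict.mk
  [("demo_request", 0), ("pricing_page_visit", 0), ("email_reply", 0),
   ("case_study_view", 1), ("product_page_visit", 1), ("whitepaper_download", 1),
   ("webinar_attendance", 1), ("return_visitor", 1),
   ("email_open", 2), ("social_share", 2), ("video_watch", 2), ("linkedin_engagement", 2)]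

def identify_buying_stage_alt (intent_data : List (String × List String)) : String :=
  let best := ((PySem.Dict.mk intent_data).getD "signals_detected" []).foldl
    (fun b s => let r := pvRankTable.getD s 3; if r < b then r else b) 3
  if best == 0 then "decision"
  else if best == 1 then "consideration"
  else if best == 2 then "awareness"
  else "unknown"

-- ===== PRECONDITION & SPEC =====
def Spec_identify_buying_stage (intent_data : List (String × List String)) (out : String) : Prop := out = identify_buying_stage_alt intent_data
instance (intent_data : List (String × List String)) (out : String) : Decidable (Spec_identify_buying_stage intent_data out) := by unfold Spec_identify_buying_stage; infer_instance

-- ===== CLAIM (what is proved, stated in full; the proofs are below) =====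
def Claim_equal_identify_buying_stage : Prop := ∀ (intent_data : List (String × List String)), Dom_identify_buying_stage intent_data → Spec_identify_buying_stage intent_data (identify_buying_stage intent_data)

-- ===== LEMMAS AND PROOFS =====

def pvRank (s : String) : Int := pvRankTable.getD s 3

set_option maxHeartbeats 1000000 in
lemma pvRank_eq (s : String) : pvRank s =
    if s = "demo_request" ∨ s = "pricing_page_visit" ∨ s = "email_reply" then 0
    else if s = "case_study_view" ∨ s = "product_page_visit" ∨ s = "whitepaper_download" ∨
            s = "webinar_attendance" ∨ s = "return_visitor" then 1
    else if s = "email_open" ∨ s = "social_share" ∨ s = "video_watch" ∨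
            s = "linkedin_engagement" then 2
    else 3 := by
  simp only [pvRank, pvRankTable, PySem.Dict.getD_eq_get?_getD, PySem.Dict.get?_mk_cons,
    beq_iff_eq]
  split_ifs <;> simp_all [eq_comm, PySem.Dict.get?]

-- the minimum-rank value a list of signals yields
def pvN (l : List String) : Int :=
  if l.any (fun s => pvRank s == 0) then 0
  else if l.any (fun s => pvRank s == 1) then 1
  else if l.any (fun s => pvRank s == 2) then 2
  else 3

lemma pvRank_cases (s : String) : pvRank s = 0 ∨ pvRank s = 1 ∨ pvRank s = 2 ∨ pvRank s = 3 := by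
  rw [pvRank_eq]; split_ifs <;> simp

lemma pvN_cons (s : String) (l : List String) : pvN (s :: l) = min (pvRank s) (pvN l) := by
  rcases pvRank_cases s with h | h | h | h <;>
    simp only [pvN, List.any_cons, h, Bool.or_eq_true, beq_iff_eq] <;>
    by_cases h0 : l.any (fun s => pvRank s == 0) = true <;>
    by_cases h1 : l.any (fun s => pvRank s == 1) = true <;>
    by_cases h2 : l.any (fun s => pvRank s == 2) = true <;>
    simp [h0, h1, h2]

lemma pvFold_min (l : List String) : ∀ b : Int, b ≤ 3 →
    l.foldl (fun b s => let r := pvRank s; if r < b then r else b) b = min b (pvN l) := by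
  induction l with
  | nil => intro b hb; simp only [List.foldl_nil, pvN]; simp; omega
  | cons s l ih =>
    intro b hb
    have hs := pvRank_cases s
    rw [List.foldl_cons, ih _ (by simp only []; split_ifs <;> omega), pvN_cons]
    simp only []
    split_ifs with h <;> omega

lemma any_eq_rank0 (l : List String) :
    (["demo_request", "pricing_page_visit", "email_reply"].any (fun s => l.contains s))
      = l.any (fun s => pvRank s == 0) := by
  rw [Bool.eq_iff_iff]
  simp only [List.any_eq_true, List.contains_iff_mem, beq_iff_eq, List.mem_cons,
    List.not_mem_nil, or_false]
  constructor
  · rintro ⟨s, hs, hmem⟩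
    refine ⟨s, hmem, ?_⟩
    rw [pvRank_eq]; rcases hs with rfl | rfl | rfl <;> decide
  · rintro ⟨s, hmem, hr⟩
    rw [pvRank_eq] at hr
    split_ifs at hr with h1 h2 h3 <;> exact ⟨s, by tauto, hmem⟩

lemma any_eq_rank1 (l : List String) :
    (["case_study_view", "product_page_visit", "whitepaper_download", "webinar_attendance",
      "return_visitor"].any (fun s => l.contains s)) = l.any (fun s => pvRank s == 1) := by
  rw [Bool.eq_iff_iff]
  simp only [List.any_eq_true, List.contains_iff_mem, beq_iff_eq, List.mem_cons,
    List.not_mem_nil, or_false]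
  constructor
  · rintro ⟨s, hs, hmem⟩
    refine ⟨s, hmem, ?_⟩
    rw [pvRank_eq]; rcases hs with rfl | rfl | rfl | rfl | rfl <;> decide
  · rintro ⟨s, hmem, hr⟩
    rw [pvRank_eq] at hr
    split_ifs at hr with h1 h2 h3 <;> exact ⟨s, by tauto, hmem⟩

lemma any_eq_rank2 (l : List String) :
    (["email_open", "social_share", "video_watch", "linkedin_engagement"].any
      (fun s => l.contains s)) = l.any (fun s => pvRank s == 2) := by
  rw [Bool.eq_iff_iff]
  simp only [List.any_eq_true, List.contains_iff_mem, beq_iff_eq, List.mem_cons,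
    List.not_mem_nil, or_false]
  constructor
  · rintro ⟨s, hs, hmem⟩
    refine ⟨s, hmem, ?_⟩
    rw [pvRank_eq]; rcases hs with rfl | rfl | rfl | rfl <;> decide
  · rintro ⟨s, hmem, hr⟩
    rw [pvRank_eq] at hr
    split_ifs at hr with h1 h2 h3 <;> exact ⟨s, by tauto, hmem⟩

-- ===== VERDICT (by name: the statement is the Claim_ definition above) =====
theorem identify_buying_stage_spec : Claim_equal_identify_buying_stage := by
  intro d _
  unfold Spec_identify_buying_stage identify_buying_stage identify_buying_stage_alt
  set l := (PySem.Dict.mk d).getD "signals_detected" [] with hl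
  have hfold : l.foldl (fun b s => let r := pvRankTable.getD s 3; if r < b then r else b) 3
      = min 3 (pvN l) := by
    have := pvFold_min l 3 (by norm_num)
    simpa [pvRank] using this
  simp only [hfold, any_eq_rank0, any_eq_rank1, any_eq_rank2]
  by_cases h0 : l.any (fun s => pvRank s == 0) = true <;>
  by_cases h1 : l.any (fun s => pvRank s == 1) = true <;>
  by_cases h2 : l.any (fun s => pvRank s == 2) = true <;>
  simp [pvN, h0, h1, h2]
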